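-- pv_equiv track=rewrite | github.com/Nibbles0n/range_filter_strategy | full_strategy_opt.py | get_direction
-- ===== SOURCE A (Python) =====
-- def get_direction(filt):
--     """Get filter direction."""
--     direction = [0] * len(filt)
--     for i in range(1, len(filt)):
--         if filt[i] > filt[i-1]:
--             direction[i] = 1
--         elif filt[i] < filt[i-1]:
--             direction[i] = -1
--         else:
--             direction[i] = direction[i-1]
--     return direction
-- ===== SOURCE B (Python) =====
-- def get_direction(filt):
--     """Get filter direction."""
--     out = []
--     n = len(filt)
--     i = 0
--     prev = None
--     while i < n:
--         v = filt[i]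
--         j = i
--         while j < n and filt[j] == v:
--             j += 1
--         d = 0 if prev is None else (1 if v > prev else -1)
--         out.extend([d] * (j - i))
--         prev = v
--         i = j
--     return out
-- ===== Notes on version B (the rewrite author's own statement) =====
-- stated objective: alternative
-- what changed: Replaces A's per-element carry loop with two-pointer run segmentation: an inner pointer advances over each maximal run of equal values and a constant direction block (sign of the run value vs the previous run's value, 0 for the first run) is emitted per run, so no per-element carry state exists.
import Mathlib
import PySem

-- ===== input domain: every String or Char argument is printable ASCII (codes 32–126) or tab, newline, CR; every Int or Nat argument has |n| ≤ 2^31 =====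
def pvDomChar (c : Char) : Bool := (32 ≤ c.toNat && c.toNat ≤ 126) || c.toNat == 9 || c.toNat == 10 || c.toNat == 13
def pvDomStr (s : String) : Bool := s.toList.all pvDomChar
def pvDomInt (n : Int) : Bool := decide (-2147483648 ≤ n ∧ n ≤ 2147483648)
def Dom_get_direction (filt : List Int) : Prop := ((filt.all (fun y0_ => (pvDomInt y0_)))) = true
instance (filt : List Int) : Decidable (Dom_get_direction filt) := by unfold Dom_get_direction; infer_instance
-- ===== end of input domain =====

-- B replaces A's per-element carry loop by two-pointer run segmentation: it scans each
-- maximal run of equal values and emits one constant direction block per run.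

-- ===== PORT A =====
-- direction = [0]*len(filt); for i in range(1, len(filt)): …indexed reads/writes…
def get_direction (filt : List Int) : List Int :=
  (PySem.List.pyRange 1 (PySem.List.len filt) 1).foldl
    (fun direction i =>
      if PySem.List.pyGetD filt i 0 > PySem.List.pyGetD filt (i - 1) 0 then
        PySem.List.pySetD direction i 1
      else if PySem.List.pyGetD filt i 0 < PySem.List.pyGetD filt (i - 1) 0 then
        PySem.List.pySetD direction i (-1)
      else
        PySem.List.pySetD direction i (PySem.List.pyGetD direction (i - 1) 0))
    (List.replicate filt.length (0 : Int))

-- ===== PORT B =====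
-- inner while loop 'while j < n and filt[j] == v: j += 1' on the remaining suffix:
-- returns (run length beyond i, suffix after the run)
def pvSpanRun (v : Int) : List Int → Nat × List Int
  | [] => (0, [])
  | x :: xs => if x = v then ((pvSpanRun v xs).1 + 1, (pvSpanRun v xs).2) else (0, x :: xs)

lemma pvSpanRun_len_le (v : Int) (xs : List Int) : (pvSpanRun v xs).2.length ≤ xs.length := by
  induction xs with
  | nil => simp [pvSpanRun]
  | cons x xs ih =>
    by_cases h : x = v
    · simp only [pvSpanRun, if_pos h]; exact Nat.le_succ_of_le ih
    · simp [pvSpanRun, if_neg h]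

-- outer while loop: one iteration per run; 'prev' is the previous run's value (None at start)
def pvEmit : Option Int → List Int → List Int
  | _, [] => []
  | prev, x :: xs =>
    let d : Int := match prev with | none => 0 | some p => if x > p then 1 else -1
    List.replicate ((pvSpanRun x xs).1 + 1) d ++ pvEmit (some x) (pvSpanRun x xs).2
termination_by _ l => l.length
decreasing_by exact Nat.lt_succ_of_le (pvSpanRun_len_le _ _)

def get_direction_alt (filt : List Int) : List Int := pvEmit none filt

-- ===== PRECONDITION & SPEC =====
def Spec_get_direction (filt : List Int) (out : List Int) : Prop := out = get_direction_alt filt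
instance (filt : List Int) (out : List Int) : Decidable (Spec_get_direction filt out) := by unfold Spec_get_direction; infer_instance

-- ===== CLAIM (what is proved, stated in full; the proofs are below) =====
def Claim_equal_get_direction : Prop := ∀ (filt : List Int), Dom_get_direction filt → Spec_get_direction filt (get_direction filt)

-- ===== LEMMAS AND PROOFS =====

/-- The carry step A realizes for one adjacent pair. -/
def pvStep (prev cur last : Int) : Int :=
  if cur > prev then 1 else if cur < prev then -1 else last

/-- Reference recursion: directions for the tail, given previous element and carry. -/
def pvDirFrom (prev last : Int) : List Int → List Int
  | [] => []
  | x :: xs => pvStep prev x last :: pvDirFrom x (pvStep prev x last) xs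

/-- Reference result. -/
def pvSpec : List Int → List Int
  | [] => []
  | x :: xs => 0 :: pvDirFrom x 0 xs

-- ---- B-side: pvEmit = pvSpec ----

lemma pvSpanRun_decomp (v : Int) (xs : List Int) :
    xs = List.replicate (pvSpanRun v xs).1 v ++ (pvSpanRun v xs).2 := by
  induction xs with
  | nil => rfl
  | cons x xs ih =>
    by_cases h : x = v
    · subst h
      rw [pvSpanRun, if_pos rfl, List.replicate_succ, List.cons_append]
      exact congrArg _ ih
    · simp [pvSpanRun, if_neg h]

lemma pvSpanRun_head (v : Int) (xs : List Int) :
    ∀ y ∈ (pvSpanRun v xs).2.head?, y ≠ v := by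
  induction xs with
  | nil => simp [pvSpanRun]
  | cons x xs ih =>
    by_cases h : x = v
    · simpa only [pvSpanRun, if_pos h] using ih
    · simpa [pvSpanRun, if_neg h] using h

/-- Carrying over a run of equal values just repeats the carry. -/
lemma pvDirFrom_replicate (c : Nat) (v last : Int) (r : List Int) :
    pvDirFrom v last (List.replicate c v ++ r) = List.replicate c last ++ pvDirFrom v last r := by
  induction c with
  | zero => rfl
  | succ c ih =>
    have hs : pvStep v v last = last := by unfold pvStep; simp
    simp only [List.replicate_succ, List.cons_append, pvDirFrom, hs, ih]

/-- B's run emission agrees with the reference recursion whenever the suffix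
    starts with a value different from the previous run's value. -/
lemma pvEmit_eq_dirFrom : ∀ (n : Nat) (xs : List Int), xs.length ≤ n →
    ∀ (p last : Int), (∀ y ∈ xs.head?, y ≠ p) →
    pvEmit (some p) xs = pvDirFrom p last xs := by
  intro n
  induction n with
  | zero =>
    intro xs h _ _ _
    rw [List.length_eq_zero_iff.mp (Nat.le_zero.mp h)]
    rw [pvEmit]
    rfl
  | succ n ih =>
    intro xs hn p last hh
    cases xs with
    | nil => rw [pvEmit]; rfl
    | cons x xs =>
      have hxp : x ≠ p := hh x (by simp)
      have hd : pvStep p x last = (if x > p then (1 : Int) else -1) := by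
        unfold pvStep; split_ifs <;> omega
      rw [pvEmit]
      simp only [List.replicate_succ, List.cons_append]
      have hxs := pvSpanRun_decomp x xs
      conv_rhs => rw [pvDirFrom, hxs]
      rw [hd, pvDirFrom_replicate]
      congr 1
      congr 1
      exact ih _ (by
          have := pvSpanRun_len_le x xs
          simpa using le_trans this (Nat.le_of_succ_le_succ hn))
        x _ (pvSpanRun_head x xs)

/-- B's port computes the reference result. -/
lemma alt_eq_pvSpec (filt : List Int) : get_direction_alt filt = pvSpec filt := by
  cases filt with
  | nil => show pvEmit none [] = pvSpec []; rw [pvEmit]; rfl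
  | cons x xs =>
    show pvEmit none (x :: xs) = 0 :: pvDirFrom x 0 xs
    rw [pvEmit]
    simp only [List.replicate_succ, List.cons_append]
    conv_rhs => rw [pvSpanRun_decomp x xs, pvDirFrom_replicate]
    congr 2
    exact pvEmit_eq_dirFrom xs.length _ (pvSpanRun_len_le x xs) x 0 (pvSpanRun_head x xs)

-- ---- A-side: get_direction = pvSpec ----

lemma length_pvDirFrom (xs : List Int) : ∀ prev last, (pvDirFrom prev last xs).length = xs.length := by
  induction xs with
  | nil => intro _ _; rfl
  | cons y ys ih => intro prev last; simp [pvDirFrom, ih]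

lemma length_pvSpec (filt : List Int) : (pvSpec filt).length = filt.length := by
  cases filt with
  | nil => rfl
  | cons x xs => simp [pvSpec, length_pvDirFrom]

lemma pvDirFrom_getD (xs : List Int) : ∀ (k : Nat) (prev last : Int), k < xs.length →
    (pvDirFrom prev last xs).getD k 0 =
      pvStep (if k = 0 then prev else xs.getD (k - 1) 0) (xs.getD k 0)
        (if k = 0 then last else (pvDirFrom prev last xs).getD (k - 1) 0) := by
  induction xs with
  | nil => intro k _ _ h; simp at h
  | cons y ys ih =>
    intro k prev last hk
    cases k with
    | zero => simp [pvDirFrom]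
    | succ j =>
      simp only [pvDirFrom, List.getD_cons_succ]
      rw [ih j y (pvStep prev y last) (by simpa using hk)]
      cases j with
      | zero => simp
      | succ i => simp

/-- The step characterisation of the reference result at index k ≥ 1. -/
lemma pvSpec_getD (filt : List Int) (k : Nat) (hk1 : 1 ≤ k) (hk : k < filt.length) :
    (pvSpec filt).getD k 0 =
      pvStep (filt.getD (k - 1) 0) (filt.getD k 0) ((pvSpec filt).getD (k - 1) 0) := by
  cases filt with
  | nil => simp at hk
  | cons x xs =>
    cases k with
    | zero => omega
    | succ j =>
      simp only [pvSpec, List.getD_cons_succ]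
      rw [pvDirFrom_getD xs j x 0 (by simpa using hk)]
      cases j with
      | zero => simp
      | succ i => simp

/-- Writing at the boundary of a prefix of pvSpec extends the prefix. -/
lemma set_take_step (D : List Int) (m : Nat) (hm : m < D.length) (rest : List Int) :
    (D.take m ++ (0 : Int) :: rest).set m (D.getD m 0) = D.take (m + 1) ++ rest := by
  have hlen : (D.take m).length = m := List.length_take_of_le (by omega)
  rw [List.set_append_right _ _ (by omega)]
  have h2 : D.take (m + 1) ++ rest = D.take m ++ D[m] :: rest := by
    rw [List.take_add_one, List.getElem?_eq_getElem hm]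
    rw [Option.toList_some, List.append_assoc, List.singleton_append]
  rw [h2]
  simp only [hlen, Nat.sub_self, List.set_cons_zero]
  rw [List.getD_eq_getElem D 0 hm]

/-- Invariant of A's loop: after processing range(1, m) the first m slots hold the answer. -/
lemma A_loop (filt : List Int) : ∀ (m : Nat), 1 ≤ m → m ≤ filt.length →
    (PySem.List.pyRange 1 (m : Int) 1).foldl
      (fun direction i =>
        if PySem.List.pyGetD filt i 0 > PySem.List.pyGetD filt (i - 1) 0 then
          PySem.List.pySetD direction i 1
        else if PySem.List.pyGetD filt i 0 < PySem.List.pyGetD filt (i - 1) 0 then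
          PySem.List.pySetD direction i (-1)
        else
          PySem.List.pySetD direction i (PySem.List.pyGetD direction (i - 1) 0))
      (List.replicate filt.length (0 : Int))
    = (pvSpec filt).take m ++ List.replicate (filt.length - m) 0 := by
  intro m
  induction m with
  | zero => intro h; omega
  | succ m ih =>
    intro _ hm1
    by_cases hm0 : m = 0
    · subst hm0
      rw [PySem.List.pyRange_one_eq_nil (by norm_num)]
      cases filt with
      | nil => simp at hm1
      | cons x xs =>
        simp only [List.foldl_nil, pvSpec]
        cases xs with
        | nil => simp
        | cons y ys => simp [List.replicate_succ]
    · have hm : 1 ≤ m := by omega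
      have hmlt : m < filt.length := by omega
      have hcast : ((m : Int) + 1) = ((m + 1 : Nat) : Int) := by push_cast; ring
      rw [← hcast, PySem.List.pyRange_one_succ_right (by exact_mod_cast hm),
        List.foldl_append, ih hm (by omega)]
      have hsub : ((m : Int) - 1) = ((m - 1 : Nat) : Int) := by omega
      have hDlen : m < (pvSpec filt).length := by rw [length_pvSpec]; exact hmlt
      have hrep : List.replicate (filt.length - m) (0 : Int)
          = (0 : Int) :: List.replicate (filt.length - (m + 1)) 0 := by
        have : filt.length - m = (filt.length - (m + 1)) + 1 := by omega
        rw [this, List.replicate_succ]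
      have htake : m - 1 < ((pvSpec filt).take m).length := by
        rw [List.length_take_of_le (by omega)]; omega
      have hprev : ((pvSpec filt).take m ++ List.replicate (filt.length - m) (0 : Int)).getD
          (m - 1) 0 = (pvSpec filt).getD (m - 1) 0 := by
        rw [List.getD_append _ _ 0 _ htake]
        rw [List.getD_eq_getElem _ 0 htake, List.getD_eq_getElem _ 0 (by omega),
          List.getElem_take]
      simp only [List.foldl_cons, List.foldl_nil, hsub, PySem.List.pyGetD_natCast,
        PySem.List.pySetD_natCast]
      rw [hprev, hrep]
      have hstep := pvSpec_getD filt m hm hmlt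
      unfold pvStep at hstep
      split_ifs with h1 h2
      · rw [if_pos h1] at hstep
        rw [← hstep, set_take_step _ _ hDlen]
      · rw [if_neg h1, if_pos h2] at hstep
        rw [← hstep, set_take_step _ _ hDlen]
      · rw [if_neg h1, if_neg h2] at hstep
        rw [← hstep, set_take_step _ _ hDlen]

/-- A's port computes the reference result. -/
lemma A_eq_pvSpec (filt : List Int) : get_direction filt = pvSpec filt := by
  unfold get_direction
  cases hf : filt with
  | nil => rfl
  | cons x xs =>
    rw [← hf]
    have hlen : 1 ≤ filt.length := by rw [hf]; simp
    have : PySem.List.len filt = ((filt.length : Nat) : Int) := by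
      simp [PySem.List.len_eq]
    rw [this, A_loop filt filt.length hlen (le_refl _)]
    rw [List.take_of_length_le (le_of_eq (length_pvSpec filt))]
    simp

-- ===== VERDICT (by name: the statement is the Claim_ definition above) =====
theorem get_direction_spec : Claim_equal_get_direction := by
  intro filt _
  show get_direction filt = get_direction_alt filt
  rw [A_eq_pvSpec, alt_eq_pvSpec]
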